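-- pv_equiv track=rewrite | github.com/kody-w/localFirstTools | compressor.py | _heading_must_keep
-- ===== SOURCE A (Python) =====
-- def _heading_must_keep(title: str) -> bool:
--     key_terms = (
--         "requirement",
--         "requirements",
--         "constraint",
--         "constraints",
--         "api",
--         "schema",
--         "contract",
--         "definition",
--         "definitions",
--         "rules",
--         "protocol",
--         "interface",
--         "spec",
--         "specification",
--         "security",
--         "compliance",
--     )
--     t = title.strip().lower()
--     return any(k in t for k in key_terms)
-- ===== SOURCE B (Python) =====
-- def _heading_must_keep(title: str) -> bool:
--     key_terms = (
--         "requirement",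
--         "requirements",
--         "constraint",
--         "constraints",
--         "api",
--         "schema",
--         "contract",
--         "definition",
--         "definitions",
--         "rules",
--         "protocol",
--         "interface",
--         "spec",
--         "specification",
--         "security",
--         "compliance",
--     )
--     t = title.strip().lower()
--     # single left-to-right pass over positions: at each offset test whether
--     # some key term starts there, instead of 16 independent substring scans
--     for i in range(len(t) + 1):
--         if any(t.startswith(k, i) for k in key_terms):
--             return True
--     return False
-- ===== Notes on version B (the rewrite author's own statement) =====
-- stated objective: alternative
-- what changed: Replaced 16 independent full-string substring scans (any(k in t)) by a single left-to-right pass over the positions of t, testing at each offset whether any key term starts there (t.startswith(k, i)).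
import Mathlib
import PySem

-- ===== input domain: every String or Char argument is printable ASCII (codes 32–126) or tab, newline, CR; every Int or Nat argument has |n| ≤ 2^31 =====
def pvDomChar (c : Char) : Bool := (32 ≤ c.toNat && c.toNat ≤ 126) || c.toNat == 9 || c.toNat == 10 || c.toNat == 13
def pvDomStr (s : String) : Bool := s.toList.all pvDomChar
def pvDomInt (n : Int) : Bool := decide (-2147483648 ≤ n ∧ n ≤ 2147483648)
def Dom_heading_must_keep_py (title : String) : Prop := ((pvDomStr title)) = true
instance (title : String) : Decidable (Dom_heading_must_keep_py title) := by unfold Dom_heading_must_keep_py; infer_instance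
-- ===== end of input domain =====

-- B replaces the 16 independent substring scans by one left-to-right pass over positions ('alternative', same cost).

-- the key_terms tuple, shared verbatim by both ports
def pvKeyTerms : List String :=
  ["requirement", "requirements", "constraint", "constraints", "api", "schema",
   "contract", "definition", "definitions", "rules", "protocol", "interface",
   "spec", "specification", "security", "compliance"]

-- ===== PORT A =====
-- t = title.strip().lower(); return any(k in t for k in key_terms)
def heading_must_keep_py (title : String) : Bool :=
  let t := PySem.Str.lower (PySem.Str.strip title)
  pvKeyTerms.any (fun k => PySem.Str.isIn k t)

-- ===== PORT B =====
-- t = title.strip().lower(); for i in range(len(t)+1): if any(t.startswith(k, i)): return True; return False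
def heading_must_keep_py_alt (title : String) : Bool :=
  let t := PySem.Str.lower (PySem.Str.strip title)
  (List.range ((PySem.Str.len t).toNat + 1)).any (fun i =>
    pvKeyTerms.any (fun k => k.toList.isPrefixOf (t.toList.drop i)))

-- ===== PRECONDITION & SPEC =====
def Spec_heading_must_keep_py (title : String) (out : Bool) : Prop := out = heading_must_keep_py_alt title
instance (title : String) (out : Bool) : Decidable (Spec_heading_must_keep_py title out) := by unfold Spec_heading_must_keep_py; infer_instance

-- ===== CLAIM (what is proved, stated in full; the proofs are below) =====
def Claim_equal_heading_must_keep_py : Prop := ∀ (title : String), Dom_heading_must_keep_py title → Spec_heading_must_keep_py title (heading_must_keep_py title)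

-- ===== LEMMAS AND PROOFS =====

-- the position scan finds a term iff some term is a substring
lemma pv_scan_eq_any_isIn (terms : List String) (t : List Char) :
    (List.range (t.length + 1)).any (fun i =>
      terms.any (fun k => k.toList.isPrefixOf (t.drop i)))
    = terms.any (fun k => PySem.Chars.isIn k.toList t) := by
  rw [Bool.eq_iff_iff]
  simp only [List.any_eq_true, List.mem_range, List.isPrefixOf_iff_prefix,
    ← PySem.Chars.exists_prefix_drop_iff_isIn]
  constructor
  · rintro ⟨i, _, k, hk, hp⟩
    exact ⟨k, hk, i, hp⟩
  · rintro ⟨k, hk, j, hp⟩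
    refine ⟨min j t.length, by omega, k, hk, ?_⟩
    rcases le_or_gt j t.length with h | h
    · simpa [min_eq_left h] using hp
    · have : t.drop j = [] := List.drop_eq_nil_of_le (le_of_lt h)
      have hnil : k.toList <+: ([] : List Char) := this ▸ hp
      have : min j t.length = t.length := by omega
      simpa [this, List.drop_length] using hnil

-- ===== VERDICT (by name: the statement is the Claim_ definition above) =====
theorem heading_must_keep_py_spec : Claim_equal_heading_must_keep_py := by
  intro title _
  show heading_must_keep_py title = heading_must_keep_py_alt title
  unfold heading_must_keep_py heading_must_keep_py_alt
  simp only [PySem.Str.len_eq, Int.toNat_natCast, PySem.Str.isIn_eq]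
  exact (pv_scan_eq_any_isIn pvKeyTerms _).symm
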